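-- pv_equiv track=rewrite | github.com/Subhayan18/TissueBERT_analysis | step_1_data_preparation/step1.4/data_augmentation.py | _reverse_complement_3mers
-- ===== SOURCE A (Python) =====
-- def _reverse_complement_3mers(threemer_sequence: str) -> str:
--     """
--     Convert 3-mer sequence to reverse complement.
--
--     Args:
--         threemer_sequence: Space-separated 3-mer sequence
--
--     Returns:
--         str: Reverse complemented 3-mer sequence
--     """
--     # Complement mapping
--     complement = {
--         'A': 'T', 'T': 'A',
--         'C': 'G', 'G': 'C',
--         'N': 'N'
--     }
--
--     # Split into 3-mers
--     threemers = threemer_sequence.split()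
--
--     # Reverse complement each 3-mer
--     rc_threemers = []
--     for kmer in threemers:
--         rc_kmer = ''.join([complement.get(base, 'N') for base in reversed(kmer)])
--         rc_threemers.append(rc_kmer)
--
--     # Reverse the order of 3-mers
--     rc_threemers = rc_threemers[::-1]
--
--     return ' '.join(rc_threemers)
-- ===== SOURCE B (Python) =====
-- def _reverse_complement_3mers(threemer_sequence: str) -> str:
--     """Reverse complement a space-separated 3-mer sequence in one
--     whole-string pass: normalize whitespace, reverse, complement."""
--     table = {'A': 'T', 'T': 'A', 'C': 'G', 'G': 'C', 'N': 'N', ' ': ' '}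
--     joined = ' '.join(threemer_sequence.split())
--     return ''.join(table.get(c, 'N') for c in reversed(joined))
-- ===== Notes on version B (the rewrite author's own statement) =====
-- stated objective: simpler
-- what changed: Replaces the per-token loop (complement each 3-mer, then reverse the token list, then join) by one whole-string pass: normalize whitespace via split/join, then reverse the joined string and complement every character with a map that sends space to space.
import Mathlib
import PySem

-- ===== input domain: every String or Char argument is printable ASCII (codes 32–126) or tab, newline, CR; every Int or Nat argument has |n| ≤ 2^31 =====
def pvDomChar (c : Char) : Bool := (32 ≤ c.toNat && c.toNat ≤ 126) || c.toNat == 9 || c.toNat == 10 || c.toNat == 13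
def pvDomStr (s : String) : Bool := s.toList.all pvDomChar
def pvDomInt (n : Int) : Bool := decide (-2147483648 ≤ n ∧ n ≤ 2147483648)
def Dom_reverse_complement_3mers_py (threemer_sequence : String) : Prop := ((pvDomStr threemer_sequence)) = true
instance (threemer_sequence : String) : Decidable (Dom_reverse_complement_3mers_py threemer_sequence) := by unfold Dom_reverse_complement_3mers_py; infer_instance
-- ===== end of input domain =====

-- B replaces A's per-token complement loop + token-list reversal by a single
-- whole-string reverse-and-complement pass over the whitespace-normalized string
-- (objective: simpler; same O(n) cost).

-- ===== PORT A =====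
-- the literal dict {'A':'T','T':'A','C':'G','G':'C','N':'N'}
def pvCompDictA : PySem.Dict Char Char :=
  PySem.Dict.ofList [('A', 'T'), ('T', 'A'), ('C', 'G'), ('G', 'C'), ('N', 'N')]

def reverse_complement_3mers_py (threemer_sequence : String) : String :=
  let threemers := PySem.Str.split₀ threemer_sequence
  -- for kmer in threemers: rc_threemers.append(''.join([complement.get(base,'N') for base in reversed(kmer)]))
  let rc_threemers : List String :=
    threemers.foldl
      (fun acc kmer =>
        acc ++ [String.ofList ((kmer.toList.reverse).map (fun base => pvCompDictA.getD base 'N'))])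
      []
  -- rc_threemers = rc_threemers[::-1]  (step -1 never fails; slice? is some .reverse)
  let rc_threemers := (PySem.List.slice? rc_threemers none none (-1)).getD []
  PySem.Str.join " " rc_threemers

-- ===== PORT B =====
-- the literal dict {'A':'T','T':'A','C':'G','G':'C','N':'N',' ':' '}
def pvCompDictB : PySem.Dict Char Char :=
  PySem.Dict.ofList [('A', 'T'), ('T', 'A'), ('C', 'G'), ('G', 'C'), ('N', 'N'), (' ', ' ')]

def reverse_complement_3mers_py_alt (threemer_sequence : String) : String :=
  let joined := PySem.Str.join " " (PySem.Str.split₀ threemer_sequence)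
  -- ''.join(table.get(c, 'N') for c in reversed(joined))
  String.ofList ((joined.toList.reverse).map (fun c => pvCompDictB.getD c 'N'))

-- ===== PRECONDITION & SPEC =====
def Spec_reverse_complement_3mers_py (threemer_sequence : String) (out : String) : Prop := out = reverse_complement_3mers_py_alt threemer_sequence
instance (threemer_sequence : String) (out : String) : Decidable (Spec_reverse_complement_3mers_py threemer_sequence out) := by unfold Spec_reverse_complement_3mers_py; infer_instance

-- ===== CLAIM (what is proved, stated in full; the proofs are below) =====
def Claim_equal_reverse_complement_3mers_py : Prop := ∀ (threemer_sequence : String), Dom_reverse_complement_3mers_py threemer_sequence → Spec_reverse_complement_3mers_py threemer_sequence (reverse_complement_3mers_py threemer_sequence)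

-- ===== LEMMAS AND PROOFS =====

-- B's complement map agrees with A's off the space character, and fixes the space.
theorem pvCompB_eq (c : Char) :
    pvCompDictB.getD c 'N' = if c = ' ' then ' ' else pvCompDictA.getD c 'N' := by
  by_cases hA : c = 'A'; · subst hA; decide
  by_cases hT : c = 'T'; · subst hT; decide
  by_cases hC : c = 'C'; · subst hC; decide
  by_cases hG : c = 'G'; · subst hG; decide
  by_cases hN : c = 'N'; · subst hN; decide
  by_cases hS : c = ' '; · subst hS; decide
  have hget : ∀ (l : List (Char × Char)), (∀ p ∈ l, p.1 ≠ c) → (PySem.Dict.mk l).get? c = none := by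
    intro l
    induction l with
    | nil => intro _; rfl
    | cons p rest ih =>
      intro h
      have hne : (p.1 == c) = false := beq_eq_false_iff_ne.mpr (h p (List.mem_cons_self ..))
      rw [show PySem.Dict.mk (p :: rest) = PySem.Dict.mk ((p.1, p.2) :: rest) from rfl,
        PySem.Dict.get?_mk_cons, hne, if_neg (by decide : ¬ (false = true))]
      exact ih (fun q hq => h q (List.mem_cons_of_mem _ hq))
  have hB : pvCompDictB.get? c = none := by
    apply hget; intro p hp; fin_cases hp <;> (intro e; subst e; simp_all)
  have hA' : pvCompDictA.get? c = none := by
    apply hget; intro p hp; fin_cases hp <;> (intro e; subst e; simp_all)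
  rw [if_neg hS, PySem.Dict.getD_eq_get?_getD, PySem.Dict.getD_eq_get?_getD, hB, hA']

-- join with a nonempty front list, one more part at the back
theorem pv_join_append_singleton (xs : List (List Char)) (y : List Char) (h : xs ≠ []) :
    PySem.Chars.join [' '] (xs ++ [y]) = PySem.Chars.join [' '] xs ++ [' '] ++ y := by
  induction xs with
  | nil => exact absurd rfl h
  | cons a rest ih =>
    cases rest with
    | nil =>
      simp [PySem.Chars.join_cons_cons, PySem.Chars.join_singleton]
    | cons b rest' =>
      have h2 : (a :: b :: rest') ++ [y] = a :: (b :: (rest' ++ [y])) := by simp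
      have h3 : (b :: rest') ++ [y] = b :: (rest' ++ [y]) := by simp
      rw [h2, PySem.Chars.join_cons_cons, ← h3, ih (by simp), PySem.Chars.join_cons_cons]
      simp

-- tokens produced by split₀ contain no whitespace characters
theorem pv_split₀_go_no_ws (s cur : List Char) (acc : List (List Char))
    (hcur : ∀ c ∈ cur, PySem.Chars.isspace c = false)
    (hacc : ∀ t ∈ acc, ∀ c ∈ t, PySem.Chars.isspace c = false) :
    ∀ t ∈ PySem.Chars.split₀.go s cur acc, ∀ c ∈ t, PySem.Chars.isspace c = false := by
  induction s generalizing cur acc with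
  | nil =>
    intro t ht
    simp only [PySem.Chars.split₀.go] at ht
    split at ht
    · rw [List.mem_reverse] at ht; exact hacc t ht
    · rw [List.mem_reverse, List.mem_cons] at ht
      rcases ht with h | h
      · subst h; intro c hc; exact hcur c (List.mem_reverse.mp hc)
      · exact hacc t h
  | cons c rest ih =>
    intro t ht
    simp only [PySem.Chars.split₀.go] at ht
    by_cases hsp : PySem.Chars.isspace c = true
    · rw [if_pos hsp] at ht
      split at ht
      · exact ih [] acc (by simp) hacc t ht
      · refine ih [] (cur.reverse :: acc) (by simp) ?_ t ht
        intro u hu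
        rcases List.mem_cons.mp hu with h | h
        · subst h; intro d hd; exact hcur d (List.mem_reverse.mp hd)
        · exact hacc u h
    · rw [if_neg hsp] at ht
      refine ih (c :: cur) acc ?_ hacc t ht
      intro d hd
      rcases List.mem_cons.mp hd with h | h
      · subst h; simpa using hsp
      · exact hcur d h

theorem pv_split₀_no_space (s : String) :
    ∀ t ∈ PySem.Str.split₀ s, ' ' ∉ t.toList := by
  intro t ht hc
  have h := pv_split₀_go_no_ws s.toList [] [] (by simp) (by simp)
  have hts : t.toList ∈ PySem.Chars.split₀ s.toList := by
    have := PySem.Str.split₀_map_toList s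
    rw [← this]
    exact List.mem_map_of_mem ht
  have := h _ hts ' ' hc
  simp [PySem.Chars.isspace] at this

-- the append-in-a-loop of A is a map
theorem pv_foldl_append_map {α β : Type} (f : α → β) (l : List α) (init : List β) :
    l.foldl (fun acc x => acc ++ [f x]) init = init ++ l.map f := by
  induction l generalizing init with
  | nil => simp
  | cons a rest ih => simp [ih]

-- core: reversing-and-complementing the joined string = joining the reversed
-- list of per-token reverse complements
theorem pv_core (ts : List (List Char)) (hts : ∀ t ∈ ts, ' ' ∉ t) :
    (PySem.Chars.join [' '] ts).reverse.map (fun c => pvCompDictB.getD c 'N') =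
      PySem.Chars.join [' ']
        ((ts.map (fun t => t.reverse.map (fun b => pvCompDictA.getD b 'N'))).reverse) := by
  have hmap : ∀ t : List Char, ' ' ∉ t →
      t.reverse.map (fun c => pvCompDictB.getD c 'N') =
        t.reverse.map (fun b => pvCompDictA.getD b 'N') := by
    intro t h
    apply List.map_congr_left
    intro c hc
    rw [pvCompB_eq]
    exact if_neg (fun e => h (by rw [← e]; exact List.mem_reverse.mp hc))
  induction ts with
  | nil => simp [PySem.Chars.join_nil]
  | cons a rest ih =>
    cases rest with
    | nil =>
      simp only [PySem.Chars.join_singleton, List.map_cons, List.map_nil, List.reverse_cons,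
        List.reverse_nil, List.nil_append, PySem.Chars.join_singleton]
      exact hmap a (hts a (List.mem_cons_self ..))
    | cons b rest' =>
      have hrest : ∀ t ∈ b :: rest', ' ' ∉ t := fun t h => hts t (List.mem_cons_of_mem _ h)
      rw [PySem.Chars.join_cons_cons, List.reverse_append, List.reverse_append,
        List.map_append, List.map_append,
        ih hrest]
      have hne : ((b :: rest').map (fun t => t.reverse.map (fun b => pvCompDictA.getD b 'N'))).reverse ≠ [] := by
        simp
      have : ((a :: b :: rest').map (fun t => t.reverse.map (fun b => pvCompDictA.getD b 'N'))).reverse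
          = ((b :: rest').map (fun t => t.reverse.map (fun b => pvCompDictA.getD b 'N'))).reverse
            ++ [a.reverse.map (fun b => pvCompDictA.getD b 'N')] := by
        simp
      rw [this, pv_join_append_singleton _ _ hne]
      rw [hmap a (hts a (List.mem_cons_self ..))]
      simp [pvCompB_eq]

-- ===== VERDICT (by name: the statement is the Claim_ definition above) =====
theorem reverse_complement_3mers_py_spec : Claim_equal_reverse_complement_3mers_py := by
  intro s _
  unfold Spec_reverse_complement_3mers_py reverse_complement_3mers_py reverse_complement_3mers_py_alt
  simp only [pv_foldl_append_map, List.nil_append, PySem.List.slice?_none_none_neg_one,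
    Option.getD_some]
  apply (String.toList_inj).mp
  rw [PySem.Str.toList_join]
  have hofList : ∀ l : List Char, (String.ofList l).toList = l := fun l => by
    simp
  rw [hofList]
  have hmaps : (((PySem.Str.split₀ s).map
      (fun kmer => String.ofList (kmer.toList.reverse.map (fun base => pvCompDictA.getD base 'N')))).reverse.map String.toList)
      = (((PySem.Str.split₀ s).map String.toList).map (fun t => t.reverse.map (fun b => pvCompDictA.getD b 'N'))).reverse := by
    simp only [List.map_reverse, List.map_map]
    congr 1
    apply List.map_congr_left
    intro t _
    simp [hofList]
  rw [hmaps, PySem.Str.toList_join]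
  have hsp : ∀ t ∈ (PySem.Str.split₀ s).map String.toList, ' ' ∉ t := by
    intro t ht
    rcases List.mem_map.mp ht with ⟨u, hu, rfl⟩
    exact pv_split₀_no_space s u hu
  have := pv_core ((PySem.Str.split₀ s).map String.toList) hsp
  simpa using this.symm
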